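-- pv_equiv track=rewrite | github.com/Blue084-end/Az | app.py | generate_big_road
-- ===== SOURCE A (Python) =====
-- def generate_big_road(results):
--     grid = []
--     col = []
--     last = None
--     for r in results:
--         if r == "T":
--             continue
--         if r == last:
--             col.append(r)
--         else:
--             if col:
--                 grid.append(col)
--             col = [r]
--             last = r
--     if col:
--         grid.append(col)
--     return grid
-- ===== SOURCE B (Python) =====
-- def generate_big_road(results):
--     cleaned = [r for r in results if r != "T"]
--     grid = []
--     i = 0
--     n = len(cleaned)
--     while i < n:
--         j = i
--         while j < n and cleaned[j] == cleaned[i]: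
--             j += 1
--         grid.append(cleaned[i:j])
--         i = j
--     return grid
-- ===== Notes on version B (the rewrite author's own statement) =====
-- stated objective: alternative
-- what changed: Replaces A's last/col state machine with end-of-loop flush by a two-pass decomposition: filter out 'T' first, then split the cleaned list into maximal runs of equal values with a two-pointer scan, slicing each run out directly.
import Mathlib
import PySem

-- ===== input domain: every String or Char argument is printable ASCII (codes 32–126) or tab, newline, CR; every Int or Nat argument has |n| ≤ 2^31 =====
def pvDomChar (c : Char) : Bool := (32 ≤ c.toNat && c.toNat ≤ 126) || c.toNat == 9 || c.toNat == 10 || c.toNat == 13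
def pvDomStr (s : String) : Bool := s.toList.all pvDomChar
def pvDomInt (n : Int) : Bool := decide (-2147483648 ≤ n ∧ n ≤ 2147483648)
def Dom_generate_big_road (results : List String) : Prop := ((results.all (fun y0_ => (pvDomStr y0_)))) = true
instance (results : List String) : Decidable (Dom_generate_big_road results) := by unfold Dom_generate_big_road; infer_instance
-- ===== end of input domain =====

-- B filters out "T" first, then splits the cleaned list into maximal runs with a
-- two-pointer scan; same result as A's last/col state machine, same O(n) cost.

-- ===== PORT A =====
-- A's loop, state = (grid, col, last); final flush folded into the [] case.
def pvLoopA (rs : List String) (grid : List (List String)) (col : List String)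
    (last : Option String) : List (List String) :=
  match rs with
  | [] => if col.isEmpty then grid else grid ++ [col]
  | r :: rest =>
    if r == "T" then pvLoopA rest grid col last
    else if some r == last then pvLoopA rest grid (col ++ [r]) last
    else pvLoopA rest (if col.isEmpty then grid else grid ++ [col]) [r] (some r)

def generate_big_road (results : List String) : List (List String) :=
  pvLoopA results [] [] none

-- ===== PORT B =====
-- B's outer while: take the maximal run at the front (inner while j advance =
-- takeWhile; cleaned[i:j] = that run), recurse on the rest (dropWhile).
def pvRuns (cleaned : List String) : List (List String) :=
  match cleaned with
  | [] => []
  | x :: xs => (x :: xs.takeWhile (fun r => r == x)) :: pvRuns (xs.dropWhile (fun r => r == x))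
termination_by cleaned.length
decreasing_by
  simp only [List.length_cons]
  exact Nat.lt_succ_of_le (List.length_dropWhile_le _ _)

def generate_big_road_alt (results : List String) : List (List String) :=
  pvRuns (results.filter (fun r => r ≠ "T"))

-- ===== PRECONDITION & SPEC =====
def Spec_generate_big_road (results : List String) (out : List (List String)) : Prop := out = generate_big_road_alt results
instance (results : List String) (out : List (List String)) : Decidable (Spec_generate_big_road results out) := by unfold Spec_generate_big_road; infer_instance

-- ===== CLAIM (what is proved, stated in full; the proofs are below) =====
def Claim_equal_generate_big_road : Prop := ∀ (results : List String), Dom_generate_big_road results → Spec_generate_big_road results (generate_big_road results)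

-- ===== LEMMAS AND PROOFS =====

-- After the first non-T element, col is nonempty and last = some x; from there
-- the loop produces grid ++ (col extended by the run of x) :: runs of the rest.
theorem pvLoopA_some (rs : List String) :
    ∀ (grid : List (List String)) (col : List String) (x : String), col ≠ [] →
    pvLoopA rs grid col (some x) =
      grid ++ (col ++ (rs.filter (fun r => r ≠ "T")).takeWhile (fun r => r == x))
        :: pvRuns ((rs.filter (fun r => r ≠ "T")).dropWhile (fun r => r == x)) := by
  induction rs with
  | nil =>
    intro grid col x hcol
    simp [pvLoopA, List.isEmpty_iff, hcol, pvRuns]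
  | cons r rest ih =>
    intro grid col x hcol
    by_cases hT : r = "T"
    · subst hT
      simp only [pvLoopA, beq_self_eq_true]
      rw [ih grid col x hcol]
      simp
    · by_cases hx : r = x
      · subst hx
        simp only [pvLoopA, beq_iff_eq, hT]
        rw [ih grid (col ++ [r]) r (by simp)]
        simp [hT]
      · have hbe : (r == x) = false := by simp [hx]
        simp only [pvLoopA, beq_iff_eq, if_neg hT,
          List.isEmpty_iff, if_neg hcol]
        rw [ih (grid ++ [col]) [r] r (by simp)]
        have hfil : (r :: rest).filter (fun r => r ≠ "T") =
            r :: rest.filter (fun r => r ≠ "T") := by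
          simp [hT]
        rw [hfil]
        simp [List.takeWhile, List.dropWhile, hbe, pvRuns]
        intro hc
        exact absurd hc hx

theorem pvLoopA_none (rs : List String) :
    pvLoopA rs [] [] none = pvRuns (rs.filter (fun r => r ≠ "T")) := by
  induction rs with
  | nil => simp [pvLoopA, pvRuns]
  | cons r rest ih =>
    by_cases hT : r = "T"
    · subst hT
      simpa [pvLoopA, List.filter_cons] using ih
    · rw [show pvLoopA (r :: rest) [] [] none = pvLoopA rest [] [r] (some r) from by
        simp [pvLoopA, hT]]
      rw [pvLoopA_some rest [] [r] r (by simp)]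
      simp [hT, pvRuns]

-- ===== VERDICT (by name: the statement is the Claim_ definition above) =====
theorem generate_big_road_spec : Claim_equal_generate_big_road := by
  intro results _
  unfold Spec_generate_big_road generate_big_road generate_big_road_alt
  exact pvLoopA_none results
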